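-- pv_equiv track=rewrite | github.com/pankajmore/AI_assignments | numberofobjects.py | list_nearest
-- ===== SOURCE A (Python) =====
-- def list_nearest(objective,max):
--     list=[objective]
--     for i in range(1,max+1):
--         j=objective-i
--         if(j>=0):
--             list.append(j)
--         j=objective+i
--         if(j<max):
--         	list.append(j)
--     return list
-- ===== SOURCE B (Python) =====
-- def list_nearest(objective, max):
--     lows = [objective - i for i in range(1, max + 1) if objective - i >= 0]
--     highs = [objective + i for i in range(1, max + 1) if objective + i < max]
--     result = [objective]
--     k = 0
--     while k < len(lows) or k < len(highs):
--         if k < len(lows):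
--             result.append(lows[k])
--         if k < len(highs):
--             result.append(highs[k])
--         k += 1
--     return result
-- ===== Notes on version B (the rewrite author's own statement) =====
-- stated objective: alternative
-- what changed: A's single fused loop with two inline conditional appends is replaced by a two-phase structure: build the low and high one-sided lists independently with comprehensions, then interleave them index-by-index with a separate while-loop pass.
import Mathlib
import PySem

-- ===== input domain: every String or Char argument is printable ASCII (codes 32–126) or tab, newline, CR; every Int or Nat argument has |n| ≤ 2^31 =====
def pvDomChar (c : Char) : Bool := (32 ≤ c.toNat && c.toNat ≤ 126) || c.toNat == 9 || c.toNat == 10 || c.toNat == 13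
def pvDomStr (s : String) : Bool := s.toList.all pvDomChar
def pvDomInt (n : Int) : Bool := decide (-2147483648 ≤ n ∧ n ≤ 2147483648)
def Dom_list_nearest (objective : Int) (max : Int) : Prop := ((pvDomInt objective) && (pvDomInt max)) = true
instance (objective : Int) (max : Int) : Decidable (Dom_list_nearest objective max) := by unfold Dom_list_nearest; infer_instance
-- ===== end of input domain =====

-- B replaces A's single fused loop by a two-phase build (the low and high one-sided
-- lists, then one interleave pass); objective: alternative decomposition, same cost.

-- ===== PORT A =====
-- A: one loop over range(1, max+1), conditionally appending objective-i then objective+i.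
def list_nearest (objective : Int) (max : Int) : List Int :=
  (PySem.List.pyRange 1 (max + 1) 1).foldl
    (fun lst i =>
      let lst1 := if 0 ≤ objective - i then lst ++ [objective - i] else lst
      if objective + i < max then lst1 ++ [objective + i] else lst1)
    [objective]

-- ===== PORT B =====
-- the while-loop of Source B walks both lists index by index: appends lows[k] then highs[k]
def pvInterleave : List Int → List Int → List Int
  | [], ys => ys
  | x :: xs, [] => x :: pvInterleave xs []
  | x :: xs, y :: ys => x :: y :: pvInterleave xs ys

def list_nearest_alt (objective : Int) (max : Int) : List Int :=
  let lows := ((PySem.List.pyRange 1 (max + 1) 1).filter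
      (fun i => decide (0 ≤ objective - i))).map (fun i => objective - i)
  let highs := ((PySem.List.pyRange 1 (max + 1) 1).filter
      (fun i => decide (objective + i < max))).map (fun i => objective + i)
  objective :: pvInterleave lows highs

-- ===== PRECONDITION & SPEC =====
def Spec_list_nearest (objective : Int) (max : Int) (out : List Int) : Prop := out = list_nearest_alt objective max
instance (objective : Int) (max : Int) (out : List Int) : Decidable (Spec_list_nearest objective max out) := by unfold Spec_list_nearest; infer_instance

-- ===== CLAIM (what is proved, stated in full; the proofs are below) =====
def Claim_equal_list_nearest : Prop := ∀ (objective : Int) (max : Int), Dom_list_nearest objective max → Spec_list_nearest objective max (list_nearest objective max)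

-- ===== LEMMAS AND PROOFS =====

theorem pvInterleave_nil_right (xs : List Int) : pvInterleave xs [] = xs := by
  induction xs with
  | nil => rfl
  | cons x xs ih => simp [pvInterleave, ih]

theorem takeWhile_eq_nil_of_filter_eq_nil (P : Int → Bool) (l : List Int)
    (h : l.filter P = []) : l.takeWhile P = [] := by
  cases l with
  | nil => rfl
  | cons y t =>
    have hy : P y = false := by
      by_contra hc
      have : P y = true := by cases hP : P y with
        | false => exact absurd hP hc
        | true => rfl
      simp [List.filter_cons, this] at h
    simp [List.takeWhile_cons, hy]

theorem filter_eq_takeWhile_of_antitone (P : Int → Bool) :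
    ∀ (xs : List Int), xs.Pairwise (· ≤ ·) →
    (∀ a b : Int, a ≤ b → P b = true → P a = true) →
    xs.filter P = xs.takeWhile P := by
  intro xs
  induction xs with
  | nil => intro _ _; rfl
  | cons x rest ih =>
    intro hp hmono
    rcases List.pairwise_cons.mp hp with ⟨hx, hrest⟩
    cases hPx : P x with
    | true =>
      simp [List.filter_cons, List.takeWhile_cons, hPx, ih hrest hmono]
    | false =>
      have hnone : rest.filter P = [] := by
        apply List.filter_eq_nil_iff.mpr
        intro y hy hPy
        have := hmono x y (hx y hy) hPy
        simp [this] at hPx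
      simp [List.filter_cons, List.takeWhile_cons, hPx, hnone]

theorem foldl_interleave (f g : Int → Int) (P Q : Int → Bool) :
    ∀ (xs init : List Int),
    xs.filter P = xs.takeWhile P →
    xs.filter Q = xs.takeWhile Q →
    xs.foldl (fun lst i =>
        let lst1 := if P i then lst ++ [f i] else lst
        if Q i then lst1 ++ [g i] else lst1) init
      = init ++ pvInterleave ((xs.filter P).map f) ((xs.filter Q).map g) := by
  intro xs
  induction xs with
  | nil => intro init _ _; simp [pvInterleave]
  | cons x rest ih =>
    intro init hP hQ
    have hPrest : rest.filter P = rest.takeWhile P := by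
      cases hPx : P x with
      | true => simpa [List.filter_cons, List.takeWhile_cons, hPx] using hP
      | false =>
        have : rest.filter P = [] := by
          simpa [List.filter_cons, List.takeWhile_cons, hPx] using hP
        rw [this, takeWhile_eq_nil_of_filter_eq_nil P rest this]
    have hQrest : rest.filter Q = rest.takeWhile Q := by
      cases hQx : Q x with
      | true => simpa [List.filter_cons, List.takeWhile_cons, hQx] using hQ
      | false =>
        have : rest.filter Q = [] := by
          simpa [List.filter_cons, List.takeWhile_cons, hQx] using hQ
        rw [this, takeWhile_eq_nil_of_filter_eq_nil Q rest this]
    have hPnil : P x = false → rest.filter P = [] := by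
      intro hPx
      simpa [List.filter_cons, List.takeWhile_cons, hPx] using hP
    have hQnil : Q x = false → rest.filter Q = [] := by
      intro hQx
      simpa [List.filter_cons, List.takeWhile_cons, hQx] using hQ
    cases hPx : P x with
    | true =>
      cases hQx : Q x with
      | true =>
        simp only [List.foldl_cons, hPx, hQx, if_true, List.filter_cons,
          List.map_cons, ih _ hPrest hQrest, pvInterleave]
        simp
      | false =>
        simp only [List.foldl_cons, hPx, hQx, if_true, if_false, List.filter_cons,
          hQnil hQx, List.map_cons, List.map_nil, ih _ hPrest hQrest, pvInterleave]
        simp [hQnil hQx, pvInterleave_nil_right]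
    | false =>
      cases hQx : Q x with
      | true =>
        simp only [List.foldl_cons, hPx, hQx, if_true, if_false, List.filter_cons,
          hPnil hPx, List.map_cons, List.map_nil, ih _ hPrest hQrest, pvInterleave]
        simp [hPnil hPx, pvInterleave]
      | false =>
        simp only [List.foldl_cons, hPx, hQx, List.filter_cons,
          ih _ hPrest hQrest]
        simp

-- ===== VERDICT (by name: the statement is the Claim_ definition above) =====
theorem list_nearest_spec : Claim_equal_list_nearest := by
  intro objective max _
  unfold Spec_list_nearest list_nearest list_nearest_alt
  have hpair : (PySem.List.pyRange 1 (max + 1) 1).Pairwise (· ≤ ·) :=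
    (PySem.List.pairwise_lt_pyRange_one 1 (max + 1)).imp (fun h => le_of_lt h)
  have hP := filter_eq_takeWhile_of_antitone (fun i => decide (0 ≤ objective - i))
    (PySem.List.pyRange 1 (max + 1) 1) hpair
    (by intro a b hab hb; simp only [decide_eq_true_eq] at *; omega)
  have hQ := filter_eq_takeWhile_of_antitone (fun i => decide (objective + i < max))
    (PySem.List.pyRange 1 (max + 1) 1) hpair
    (by intro a b hab hb; simp only [decide_eq_true_eq] at *; omega)
  have := foldl_interleave (fun i => objective - i) (fun i => objective + i)
    (fun i => decide (0 ≤ objective - i)) (fun i => decide (objective + i < max))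
    (PySem.List.pyRange 1 (max + 1) 1) [objective] hP hQ
  simpa using this
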